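-- pv_equiv track=rewrite | github.com/S7rasshofer/Flowgrid | flowgrid_app/window/query_support.py | _merged_part_detail_rows
-- ===== SOURCE A (Python) =====
-- def _split_piped_values(text: str) -> list[str]:
--     raw = str(text or "")
--     if raw == "":
--         return []
--     return [str(piece or "").strip() for piece in raw.split(" | ")]
--
-- def _merged_part_detail_rows(
--     lpn_text: str,
--     part_number_text: str,
--     part_description_text: str,
--     shipping_text: str,
-- ) -> list[tuple[str, str, str, str]]:
--     lpn_values = _split_piped_values(lpn_text)
--     part_values = _split_piped_values(part_number_text)
--     desc_values = _split_piped_values(part_description_text)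
--     ship_values = _split_piped_values(shipping_text)
--     row_count = max(len(lpn_values), len(part_values), len(desc_values), len(ship_values), 0)
--
--     def value_for(values: list[str], idx: int) -> str:
--         if idx < len(values):
--             return str(values[idx] or "").strip()
--         if len(values) == 1 and row_count > 1:
--             return str(values[0] or "").strip()
--         return ""
--
--     rows: list[tuple[str, str, str, str]] = []
--     for idx in range(row_count):
--         rows.append(
--             (
--                 value_for(lpn_values, idx),
--                 value_for(part_values, idx),
--                 value_for(desc_values, idx),
--                 value_for(ship_values, idx),
--             )
--         )
--     return rows
-- ===== SOURCE B (Python) =====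
-- def _merged_part_detail_rows(
--     lpn_text: str,
--     part_number_text: str,
--     part_description_text: str,
--     shipping_text: str,
-- ) -> list[tuple[str, str, str, str]]:
--     def column(text: str) -> list[str]:
--         return [piece.strip() for piece in text.split(" | ")] if text else []
--
--     col_lpn = column(lpn_text)
--     col_part = column(part_number_text)
--     col_desc = column(part_description_text)
--     col_ship = column(shipping_text)
--     row_count = max(len(col_lpn), len(col_part), len(col_desc), len(col_ship))
--
--     def normalize(col: list[str]) -> list[str]:
--         if len(col) == 1 and row_count > 1:
--             return col * row_count
--         return col + [""] * (row_count - len(col))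
--
--     return list(
--         zip(normalize(col_lpn), normalize(col_part), normalize(col_desc), normalize(col_ship))
--     )
-- ===== Notes on version B (the rewrite author's own statement) =====
-- stated objective: alternative
-- what changed: B first normalizes each of the four split columns to row_count entries (broadcast a singleton, pad with empty strings) and then transposes them with one zip, instead of A's index loop calling value_for four times per row.
import Mathlib
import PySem

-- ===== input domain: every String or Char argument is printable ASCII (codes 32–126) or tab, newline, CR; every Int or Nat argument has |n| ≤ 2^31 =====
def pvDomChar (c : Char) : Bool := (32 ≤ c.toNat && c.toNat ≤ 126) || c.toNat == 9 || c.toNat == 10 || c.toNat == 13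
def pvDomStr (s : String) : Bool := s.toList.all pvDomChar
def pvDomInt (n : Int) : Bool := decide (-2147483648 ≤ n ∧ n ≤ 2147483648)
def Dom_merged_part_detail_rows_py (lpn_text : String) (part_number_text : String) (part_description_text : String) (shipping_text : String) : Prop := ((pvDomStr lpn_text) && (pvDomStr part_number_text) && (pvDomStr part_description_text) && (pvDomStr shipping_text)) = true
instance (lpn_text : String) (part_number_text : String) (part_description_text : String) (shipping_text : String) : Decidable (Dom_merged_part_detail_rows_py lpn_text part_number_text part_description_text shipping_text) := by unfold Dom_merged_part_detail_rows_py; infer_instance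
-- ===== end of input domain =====

-- B normalizes the four split columns to row_count entries and transposes with one zip,
-- instead of A's per-index loop calling value_for four times per row (objective: alternative).

-- ===== PORT A =====
-- _split_piped_values; `str(text or "")` is `text` for a str argument, kept as the explicit `if`.
def pvSplitPiped (text : String) : List String :=
  let raw := if text = "" then "" else text
  if raw = "" then []
  else ((PySem.Str.split? raw " | ").getD []).map
        (fun piece => PySem.Str.strip (if piece = "" then "" else piece))

-- value_for (row_count captured from the enclosing scope); `str(v or "")` is `v` for a str v.
def pvValueFor (row_count : Nat) (values : List String) (idx : Nat) : String :=
  if idx < values.length then PySem.Str.strip (values.getD idx "")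
  else if values.length = 1 ∧ 1 < row_count then PySem.Str.strip (values.getD 0 "")
  else ""

def merged_part_detail_rows_py (lpn_text : String) (part_number_text : String) (part_description_text : String) (shipping_text : String) : List (String × String × String × String) :=
  let lpn_values := pvSplitPiped lpn_text
  let part_values := pvSplitPiped part_number_text
  let desc_values := pvSplitPiped part_description_text
  let ship_values := pvSplitPiped shipping_text
  let row_count := Nat.max (Nat.max (Nat.max (Nat.max lpn_values.length part_values.length) desc_values.length) ship_values.length) 0
  (List.range row_count).foldl
    (fun rows idx =>
      rows ++ [(pvValueFor row_count lpn_values idx,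
                pvValueFor row_count part_values idx,
                pvValueFor row_count desc_values idx,
                pvValueFor row_count ship_values idx)]) []

-- ===== PORT B =====
def pvColumn (text : String) : List String :=
  if text ≠ "" then ((PySem.Str.split? text " | ").getD []).map PySem.Str.strip else []

-- `col * row_count` is flatten (replicate row_count col); `col + [""] * k` is col ++ replicate k "".
def pvNormalize (row_count : Nat) (col : List String) : List String :=
  if col.length = 1 ∧ 1 < row_count then (List.replicate row_count col).flatten
  else col ++ List.replicate (row_count - col.length) ""

def merged_part_detail_rows_py_alt (lpn_text : String) (part_number_text : String) (part_description_text : String) (shipping_text : String) : List (String × String × String × String) :=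
  let col_lpn := pvColumn lpn_text
  let col_part := pvColumn part_number_text
  let col_desc := pvColumn part_description_text
  let col_ship := pvColumn shipping_text
  let row_count := Nat.max (Nat.max (Nat.max col_lpn.length col_part.length) col_desc.length) col_ship.length
  (pvNormalize row_count col_lpn).zip
    ((pvNormalize row_count col_part).zip
      ((pvNormalize row_count col_desc).zip (pvNormalize row_count col_ship)))

-- ===== PRECONDITION & SPEC =====
def Spec_merged_part_detail_rows_py (lpn_text : String) (part_number_text : String) (part_description_text : String) (shipping_text : String) (out : List (String × String × String × String)) : Prop := out = merged_part_detail_rows_py_alt lpn_text part_number_text part_description_text shipping_text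
instance (lpn_text : String) (part_number_text : String) (part_description_text : String) (shipping_text : String) (out : List (String × String × String × String)) : Decidable (Spec_merged_part_detail_rows_py lpn_text part_number_text part_description_text shipping_text out) := by unfold Spec_merged_part_detail_rows_py; infer_instance

-- ===== CLAIM (what is proved, stated in full; the proofs are below) =====
def Claim_equal_merged_part_detail_rows_py : Prop := ∀ (lpn_text : String) (part_number_text : String) (part_description_text : String) (shipping_text : String), Dom_merged_part_detail_rows_py lpn_text part_number_text part_description_text shipping_text → Spec_merged_part_detail_rows_py lpn_text part_number_text part_description_text shipping_text (merged_part_detail_rows_py lpn_text part_number_text part_description_text shipping_text)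

-- ===== LEMMAS AND PROOFS =====

theorem pv_dropWhile_idem (p : Char → Bool) (l : List Char) :
    List.dropWhile p (List.dropWhile p l) = List.dropWhile p l := by
  induction l with
  | nil => simp
  | cons a l ih =>
    by_cases h : p a
    · simp [h, ih]
    · simp [h]

theorem pv_dropWhile_prefix {p : Char → Bool} {l m : List Char}
    (hpre : m <+: l) (hl : List.dropWhile p l = l) : List.dropWhile p m = m := by
  cases m with
  | nil => simp
  | cons a t =>
    obtain ⟨r, hr⟩ := hpre
    have hpa : ¬ p a = true := by
      intro hpa
      rw [← hr] at hl
      simp only [List.cons_append] at hl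
      rw [List.dropWhile_cons, if_pos hpa] at hl
      have h1 : (List.dropWhile p (t ++ r)).length = (a :: (t ++ r)).length :=
        congrArg List.length hl
      have h2 := (List.dropWhile_sublist (p := p) (l := t ++ r)).length_le
      rw [List.length_cons] at h1
      omega
    simp [hpa]

theorem pv_strip_fix_chars (s : List Char) :
    PySem.Chars.strip (PySem.Chars.strip s) = PySem.Chars.strip s := by
  unfold PySem.Chars.strip PySem.Chars.rstrip PySem.Chars.lstrip
  set p := PySem.Chars.isspace with hp
  set L := List.dropWhile p s with hL
  have hXpre : (List.dropWhile p L.reverse).reverse <+: L := by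
    have h := List.dropWhile_suffix (l := L.reverse) p
    have := List.reverse_prefix (l₁ := (List.dropWhile p L.reverse).reverse) (l₂ := L)
    rw [← List.reverse_suffix]
    simpa using h
  have hlst : List.dropWhile p (List.dropWhile p L.reverse).reverse
      = (List.dropWhile p L.reverse).reverse :=
    pv_dropWhile_prefix hXpre (pv_dropWhile_idem p s)
  rw [hlst, List.reverse_reverse, pv_dropWhile_idem]

theorem pv_strip_fix (s : String) :
    PySem.Str.strip (PySem.Str.strip s) = PySem.Str.strip s := by
  rw [← String.toList_inj, PySem.Str.toList_strip, PySem.Str.toList_strip]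
  exact pv_strip_fix_chars s.toList

theorem pv_col_fix {t x : String} (hx : x ∈ pvColumn t) : PySem.Str.strip x = x := by
  unfold pvColumn at hx
  split at hx
  · simp at hx
    obtain ⟨y, _, rfl⟩ := hx
    exact pv_strip_fix y
  · simp at hx

theorem pv_col_eq (t : String) : pvSplitPiped t = pvColumn t := by
  unfold pvSplitPiped pvColumn
  by_cases h : t = ""
  · simp [h]
  · simp only [h, ite_not]
    have : (fun piece : String => PySem.Str.strip (if piece = "" then "" else piece))
        = PySem.Str.strip := by
      funext piece
      by_cases hp : piece = "" <;> simp [hp]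
    simp [h, this]

theorem pv_norm_length {n : Nat} {c : List String} (h : c.length ≤ n) :
    (pvNormalize n c).length = n := by
  unfold pvNormalize
  split
  · rename_i h1
    simp [List.sum_replicate, h1.1]
  · simp
    omega

theorem pv_norm_getD {n : Nat} {c : List String}
    (hfix : ∀ x ∈ c, PySem.Str.strip x = x) (hle : c.length ≤ n)
    {i : Nat} (hi : i < n) :
    (pvNormalize n c).getD i "" = pvValueFor n c i := by
  unfold pvNormalize pvValueFor
  by_cases h1 : c.length = 1 ∧ 1 < n
  · obtain ⟨hc1, hn⟩ := h1
    obtain ⟨x, rfl⟩ : ∃ x, c = [x] := by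
      cases c with
      | nil => simp at hc1
      | cons a t =>
        cases t with
        | nil => exact ⟨a, rfl⟩
        | cons b u => simp at hc1
    have hx : PySem.Str.strip x = x := hfix x (by simp)
    have hfl : (List.replicate n [x]).flatten = List.replicate n x := by
      induction n with
      | zero => simp
      | succ m ih => simp [List.replicate_succ]
    rw [if_pos ⟨hc1, hn⟩, hfl]
    have hrep : (List.replicate n x).getD i "" = x := by
      rw [List.getD_eq_getElem _ _ (by simpa using hi), List.getElem_replicate]
    by_cases hi0 : i < 1
    · rw [if_pos (by simpa using hi0), hrep]
      have : i = 0 := by omega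
      simp [this, hx]
    · rw [if_neg (by simpa using hi0), if_pos ⟨hc1, hn⟩, hrep]
      simp [hx]
  · rw [if_neg h1]
    by_cases h2 : i < c.length
    · rw [if_pos h2]
      have hlen : i < (c ++ List.replicate (n - c.length) "").length := by simp; omega
      rw [List.getD_eq_getElem _ _ hlen, List.getElem_append_left h2,
        List.getD_eq_getElem _ _ h2]
      exact (hfix _ (List.getElem_mem h2)).symm
    · rw [if_neg h2, if_neg h1]
      have hlen : i < (c ++ List.replicate (n - c.length) "").length := by simp; omega
      rw [List.getD_eq_getElem _ _ hlen, List.getElem_append_right (by omega),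
        List.getElem_replicate]

theorem pv_foldl_append {α β : Type} (f : α → β) (l : List α) (acc : List β) :
    l.foldl (fun r x => r ++ [f x]) acc = acc ++ l.map f := by
  induction l generalizing acc with
  | nil => simp
  | cons a t ih => simp [List.foldl_cons, ih]

theorem pv_zip4 {n : Nat} {a b c d : List String}
    (ha : a.length = n) (hb : b.length = n) (hc : c.length = n) (hd : d.length = n) :
    a.zip (b.zip (c.zip d))
      = (List.range n).map (fun i => (a.getD i "", b.getD i "", c.getD i "", d.getD i "")) := by
  apply List.ext_getElem
  · simp [ha, hb, hc, hd]
  · intro i h1 h2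
    have hi : i < n := by simpa [ha, hb, hc, hd] using h1
    simp only [List.getElem_map, List.getElem_range, List.getElem_zip]
    rw [List.getD_eq_getElem _ _ (by omega), List.getD_eq_getElem _ _ (by omega),
      List.getD_eq_getElem _ _ (by omega), List.getD_eq_getElem _ _ (by omega)]

-- ===== VERDICT (by name: the statement is the Claim_ definition above) =====
theorem merged_part_detail_rows_py_spec : Claim_equal_merged_part_detail_rows_py := by
  intro lpn part desc ship _
  unfold Spec_merged_part_detail_rows_py merged_part_detail_rows_py merged_part_detail_rows_py_alt
  rw [pv_col_eq lpn, pv_col_eq part, pv_col_eq desc, pv_col_eq ship]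
  simp only [Nat.max_zero]
  set c1 := pvColumn lpn with hc1
  set c2 := pvColumn part with hc2
  set c3 := pvColumn desc with hc3
  set c4 := pvColumn ship with hc4
  set n := Nat.max (Nat.max (Nat.max c1.length c2.length) c3.length) c4.length with hn
  have l1 : c1.length ≤ n := by
    rw [hn]; exact ((Nat.le_max_left _ _).trans (Nat.le_max_left _ _)).trans (Nat.le_max_left _ _)
  have l2 : c2.length ≤ n := by
    rw [hn]; exact ((Nat.le_max_right _ _).trans (Nat.le_max_left _ _)).trans (Nat.le_max_left _ _)
  have l3 : c3.length ≤ n := by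
    rw [hn]; exact (Nat.le_max_right _ _).trans (Nat.le_max_left _ _)
  have l4 : c4.length ≤ n := by
    rw [hn]; exact Nat.le_max_right _ _
  rw [pv_foldl_append, List.nil_append,
    pv_zip4 (pv_norm_length l1) (pv_norm_length l2) (pv_norm_length l3) (pv_norm_length l4)]
  apply List.map_congr_left
  intro i hi
  rw [List.mem_range] at hi
  rw [pv_norm_getD (fun x hx => pv_col_fix hx) l1 hi,
    pv_norm_getD (fun x hx => pv_col_fix hx) l2 hi,
    pv_norm_getD (fun x hx => pv_col_fix hx) l3 hi,
    pv_norm_getD (fun x hx => pv_col_fix hx) l4 hi]
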